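-- pv_equiv track=rewrite | github.com/Dahoas/transformer_arithmetic | data/more_funcs.py | is_elysian
-- ===== SOURCE A (Python) =====
-- def is_elysian(n):
--     squares = []
--     i = 1
--     while i**2 <= n:
--         squares.append(i**2)
--         i += 1
--     for a in squares:
--         for b in squares:
--             if a + b == n and a != b:
--                 return True
--     return False
-- ===== SOURCE B (Python) =====
-- def is_elysian(n):
--     # two pointers over root values: largest root first
--     hi = 0
--     while (hi + 1) ** 2 <= n:
--         hi += 1
--     lo = 1
--     while lo < hi:
--         s = lo * lo + hi * hi
--         if s == n:
--             return True
--         if s < n: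
--             lo += 1
--         else:
--             hi -= 1
--     return False
-- ===== Notes on version B (the rewrite author's own statement) =====
-- stated objective: faster
-- what changed: Replace A's O(sqrt(n)) square list plus quadratic nested pair scan by a classic two-pointer sweep over root values (lo up from 1, hi down from isqrt(n)), so only O(sqrt(n)) sums are ever examined.
import Mathlib
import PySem

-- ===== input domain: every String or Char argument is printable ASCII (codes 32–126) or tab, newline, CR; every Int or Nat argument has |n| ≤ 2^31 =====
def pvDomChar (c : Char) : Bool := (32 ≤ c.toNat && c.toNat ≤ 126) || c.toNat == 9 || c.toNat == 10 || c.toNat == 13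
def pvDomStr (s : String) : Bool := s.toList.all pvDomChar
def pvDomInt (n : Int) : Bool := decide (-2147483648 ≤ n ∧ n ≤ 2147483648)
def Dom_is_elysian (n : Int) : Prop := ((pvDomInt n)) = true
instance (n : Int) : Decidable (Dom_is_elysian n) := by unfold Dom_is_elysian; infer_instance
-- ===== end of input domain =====

-- B replaces A's square list + quadratic nested pair scan by a two-pointer sweep over root values (objective: faster, asymptotic).

-- ===== PORT A =====
-- the while loop 'while i**2 <= n: squares.append(i**2); i += 1' (the '1 ≤ i' conjunct is a
-- totality guard only: the loop is entered with i = 1 and i only grows, so it never changes the result)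
def pvSquaresA (n i : Int) (acc : List Int) : List Int :=
  if h : i * i ≤ n ∧ 1 ≤ i then
    pvSquaresA n (i + 1) (acc ++ [i * i])
  else acc
termination_by (n + 1 - i * i).toNat
decreasing_by
  obtain ⟨h1, h2⟩ := h
  have : (i + 1) * (i + 1) = i * i + 2 * i + 1 := by ring
  omega

def is_elysian (n : Int) : Bool :=
  let squares := pvSquaresA n 1 []
  squares.any (fun a => squares.any (fun b => a + b == n && a != b))

-- ===== PORT B =====
-- 'hi = 0; while (hi+1)**2 <= n: hi += 1' (the '0 ≤ h' conjunct is a totality guard only: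
-- the loop starts at h = 0 and h only grows, so it never changes the result)
def pvRootHi (n h : Int) : Int :=
  if hg : (h + 1) * (h + 1) ≤ n ∧ 0 ≤ h then
    pvRootHi n (h + 1)
  else h
termination_by (n + 1 - (h + 1) * (h + 1)).toNat
decreasing_by
  obtain ⟨h1, h2⟩ := hg
  have : (h + 1 + 1) * (h + 1 + 1) = (h + 1) * (h + 1) + 2 * h + 3 := by ring
  omega

-- 'lo = 1; while lo < hi: …' two-pointer sweep
def pvTwoPtr (n lo hi : Int) : Bool :=
  if hg : lo < hi then
    if lo * lo + hi * hi == n then true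
    else if lo * lo + hi * hi < n then pvTwoPtr n (lo + 1) hi
    else pvTwoPtr n lo (hi - 1)
  else false
termination_by (hi - lo).toNat
decreasing_by all_goals omega

def is_elysian_alt (n : Int) : Bool :=
  pvTwoPtr n 1 (pvRootHi n 0)

-- ===== PRECONDITION & SPEC =====
def Spec_is_elysian (n : Int) (out : Bool) : Prop := out = is_elysian_alt n
instance (n : Int) (out : Bool) : Decidable (Spec_is_elysian n out) := by unfold Spec_is_elysian; infer_instance

-- ===== CLAIM (what is proved, stated in full; the proofs are below) =====
def Claim_equal_is_elysian : Prop := ∀ (n : Int), Dom_is_elysian n → Spec_is_elysian n (is_elysian n)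

-- ===== LEMMAS AND PROOFS =====

-- membership in A's square list
theorem pv_mem_squaresA (n i : Int) (acc : List Int) (hi1 : 1 ≤ i) :
    ∀ x, x ∈ pvSquaresA n i acc ↔ x ∈ acc ∨ ∃ j, i ≤ j ∧ j * j ≤ n ∧ x = j * j := by
  intro x
  unfold pvSquaresA
  split
  · rename_i h
    rw [pv_mem_squaresA n (i + 1) (acc ++ [i * i]) (by omega) x]
    simp only [List.mem_append, List.mem_singleton]
    constructor
    · rintro (⟨ha | hx⟩ | ⟨j, hj1, hj2, hj3⟩)
      · exact Or.inl ha
      · exact Or.inr ⟨i, le_refl _, h.1, hx⟩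
      · exact Or.inr ⟨j, by omega, hj2, hj3⟩
    · rintro (ha | ⟨j, hj1, hj2, hj3⟩)
      · exact Or.inl (Or.inl ha)
      · rcases eq_or_lt_of_le hj1 with rfl | hlt
        · exact Or.inl (Or.inr hj3)
        · exact Or.inr ⟨j, by omega, hj2, hj3⟩
  · rename_i h
    constructor
    · exact Or.inl
    · rintro (ha | ⟨j, hj1, hj2, hj3⟩)
      · exact ha
      · exfalso
        have : i * i ≤ j * j := by nlinarith
        exact h ⟨by omega, hi1⟩
termination_by (n + 1 - i * i).toNat
decreasing_by
  rename_i h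
  obtain ⟨h1, h2⟩ := h
  have : (i + 1) * (i + 1) = i * i + 2 * i + 1 := by ring
  omega

-- characterization of A
theorem pv_A_iff (n : Int) :
    is_elysian n = true ↔
      ∃ a b, 1 ≤ a ∧ 1 ≤ b ∧ a * a ≤ n ∧ b * b ≤ n ∧ a * a + b * b = n ∧ a * a ≠ b * b := by
  unfold is_elysian
  simp only [List.any_eq_true, Bool.and_eq_true, beq_iff_eq, bne_iff_ne, ne_eq]
  constructor
  · rintro ⟨x, hx, y, hy, hxy, hne⟩
    rw [pv_mem_squaresA n 1 [] (le_refl 1)] at hx hy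
    rcases hx with hx | ⟨a, ha1, ha2, rfl⟩
    · simp at hx
    rcases hy with hy | ⟨b, hb1, hb2, rfl⟩
    · simp at hy
    exact ⟨a, b, ha1, hb1, ha2, hb2, hxy, hne⟩
  · rintro ⟨a, b, ha1, hb1, ha2, hb2, hab, hne⟩
    refine ⟨a * a, ?_, b * b, ?_, hab, hne⟩ <;>
      rw [pv_mem_squaresA n 1 [] (le_refl 1)]
    · exact Or.inr ⟨a, ha1, ha2, rfl⟩
    · exact Or.inr ⟨b, hb1, hb2, rfl⟩

-- the hi pointer's start value: largest nonnegative root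
theorem pv_rootHi_spec (n h : Int) (hh : 0 ≤ h) (hsq : h = 0 ∨ h * h ≤ n) :
    0 ≤ pvRootHi n h ∧ n < (pvRootHi n h + 1) * (pvRootHi n h + 1) ∧
      (pvRootHi n h = 0 ∨ pvRootHi n h * pvRootHi n h ≤ n) := by
  unfold pvRootHi
  split
  · rename_i hg
    exact pv_rootHi_spec n (h + 1) (by omega) (Or.inr hg.1)
  · rename_i hg
    refine ⟨hh, ?_, hsq⟩
    push_neg at hg
    have := hg
    by_contra hc
    push_neg at hc
    omega
termination_by (n + 1 - (h + 1) * (h + 1)).toNat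
decreasing_by
  rename_i hg
  obtain ⟨h1, h2⟩ := hg
  have : (h + 1 + 1) * (h + 1 + 1) = (h + 1) * (h + 1) + 2 * h + 3 := by ring
  omega

-- two-pointer correctness: finds a pair iff one exists in the window, given lo ≥ 1
theorem pv_twoPtr_iff (n lo hi : Int) (hlo : 1 ≤ lo) :
    pvTwoPtr n lo hi = true ↔ ∃ a b, lo ≤ a ∧ a < b ∧ b ≤ hi ∧ a * a + b * b = n := by
  unfold pvTwoPtr
  split
  · rename_i hg
    split
    · rename_i he
      simp only [beq_iff_eq] at he
      simp only [true_iff]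
      exact ⟨lo, hi, le_refl _, hg, le_refl _, he⟩
    · rename_i he
      simp only [beq_iff_eq] at he
      split
      · rename_i hlt
        rw [pv_twoPtr_iff n (lo + 1) hi (by omega)]
        constructor
        · rintro ⟨a, b, h1, h2, h3, h4⟩
          exact ⟨a, b, by omega, h2, h3, h4⟩
        · rintro ⟨a, b, h1, h2, h3, h4⟩
          refine ⟨a, b, ?_, h2, h3, h4⟩
          rcases eq_or_lt_of_le h1 with rfl | h
          · exfalso
            have hb : b * b ≤ hi * hi := by nlinarith
            omega
          · omega
      · rename_i hlt
        rw [pv_twoPtr_iff n lo (hi - 1) hlo]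
        constructor
        · rintro ⟨a, b, h1, h2, h3, h4⟩
          exact ⟨a, b, h1, h2, by omega, h4⟩
        · rintro ⟨a, b, h1, h2, h3, h4⟩
          refine ⟨a, b, h1, h2, ?_, h4⟩
          rcases eq_or_lt_of_le h3 with rfl | h
          · exfalso
            have ha : lo * lo ≤ a * a := by nlinarith
            omega
          · omega
  · rename_i hg
    exact iff_of_false (by simp) (by rintro ⟨a, b, h1, h2, h3, h4⟩; omega)
termination_by (hi - lo).toNat
decreasing_by all_goals omega

theorem is_elysian_spec : Claim_equal_is_elysian := by
  intro n _
  unfold Spec_is_elysian is_elysian_alt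
  obtain ⟨hr0, hrn, hrsq⟩ := pv_rootHi_spec n 0 (le_refl 0) (Or.inl rfl)
  set r := pvRootHi n 0 with hr
  apply Bool.eq_iff_iff.mpr
  rw [pv_A_iff, pv_twoPtr_iff n 1 r (le_refl 1)]
  constructor
  · rintro ⟨a, b, ha1, hb1, ha2, hb2, hab, hne⟩
    -- order the pair: squares differ, so the roots differ
    have hneab : a ≠ b := fun h => hne (by rw [h])
    rcases lt_or_gt_of_ne hneab with h | h
    · refine ⟨a, b, ha1, h, ?_, hab⟩
      by_contra hc
      push_neg at hc
      have : (r + 1) * (r + 1) ≤ b * b := by nlinarith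
      omega
    · refine ⟨b, a, hb1, h, ?_, by omega⟩
      by_contra hc
      push_neg at hc
      have : (r + 1) * (r + 1) ≤ a * a := by nlinarith
      omega
  · rintro ⟨a, b, ha1, hab, hbr, hsum⟩
    have hrpos : 1 ≤ r := by omega
    have hrn' : r * r ≤ n := by rcases hrsq with h | h <;> omega
    have hb2 : b * b ≤ n := by nlinarith
    have ha2 : a * a ≤ n := by nlinarith
    have hne : a * a ≠ b * b := by nlinarith
    exact ⟨a, b, ha1, by omega, ha2, hb2, by omega, hne⟩
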